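-- pv_equiv track=rewrite | github.com/rohankhanna/bespoke | scripts/build_discovery_pages.py | star_bucket
-- ===== SOURCE A (Python) =====
-- STAR_BUCKETS = [
--     ("stars_unknown", None, None, "Unknown stars"),
--     ("stars_0", 0, 0, "0 stars"),
--     ("stars_1_9", 1, 9, "1 to 9 stars"),
--     ("stars_10_99", 10, 99, "10 to 99 stars"),
--     ("stars_100_999", 100, 999, "100 to 999 stars"),
--     ("stars_1000_9999", 1000, 9999, "1,000 to 9,999 stars"),
--     ("stars_10000_99999", 10000, 99999, "10,000 to 99,999 stars"),
--     ("stars_100000_999999", 100000, 999999, "100,000 to 999,999 stars"),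
--     ("stars_1000000_plus", 1000000, None, "1,000,000+ stars"),
-- ]
--
-- def star_bucket(repo):
--     stars = repo.get("stargazers_count")
--     if stars is None:
--         return "stars_unknown"
--     for key, minimum, maximum, _label in STAR_BUCKETS:
--         if minimum is None and maximum is None:
--             continue
--         if maximum is None:
--             if stars >= minimum:
--                 return key
--         elif minimum <= stars <= maximum:
--             return key
--     return STAR_BUCKETS[1][0]
-- ===== SOURCE B (Python) =====
-- def star_bucket(repo):
--     stars = repo.get("stargazers_count")
--     if stars is None:
--         return "stars_unknown"
--     bounds = [1, 10, 100, 1000, 10000, 100000, 1000000]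
--     keys = ["stars_0", "stars_1_9", "stars_10_99", "stars_100_999",
--             "stars_1000_9999", "stars_10000_99999",
--             "stars_100000_999999", "stars_1000000_plus"]
--     lo, hi = 0, len(bounds)
--     while lo < hi:
--         mid = (lo + hi) // 2
--         if bounds[mid] <= stars:
--             lo = mid + 1
--         else:
--             hi = mid
--     return keys[lo]
-- ===== Notes on version B (the rewrite author's own statement) =====
-- stated objective: alternative
-- what changed: Replaces the linear scan over the STAR_BUCKETS range table (with per-row None checks) by a hand-written binary search (bisect_right) over the sorted boundary list, indexing into a parallel key list; negatives land at index 0 giving A's 'stars_0' fallback.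
import Mathlib
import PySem

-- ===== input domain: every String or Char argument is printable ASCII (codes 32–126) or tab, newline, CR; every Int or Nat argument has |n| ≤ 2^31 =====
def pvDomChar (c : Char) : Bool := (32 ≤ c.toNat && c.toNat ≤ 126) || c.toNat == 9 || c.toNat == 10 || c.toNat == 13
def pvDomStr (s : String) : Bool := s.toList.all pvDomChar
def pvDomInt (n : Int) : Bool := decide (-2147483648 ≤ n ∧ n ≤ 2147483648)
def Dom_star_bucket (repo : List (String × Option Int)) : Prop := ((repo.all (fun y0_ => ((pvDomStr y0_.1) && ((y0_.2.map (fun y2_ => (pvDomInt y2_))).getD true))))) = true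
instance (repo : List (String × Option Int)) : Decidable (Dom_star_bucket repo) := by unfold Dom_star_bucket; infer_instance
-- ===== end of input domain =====

-- B replaces A's linear scan of the STAR_BUCKETS range table by a binary search over the
-- sorted boundary list with a parallel key list (objective: alternative algorithm).

-- ===== PORT A =====
def starBuckets : List (String × Option Int × Option Int × String) :=
  [("stars_unknown", none, none, "Unknown stars"),
   ("stars_0", some 0, some 0, "0 stars"),
   ("stars_1_9", some 1, some 9, "1 to 9 stars"),
   ("stars_10_99", some 10, some 99, "10 to 99 stars"),
   ("stars_100_999", some 100, some 999, "100 to 999 stars"),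
   ("stars_1000_9999", some 1000, some 9999, "1,000 to 9,999 stars"),
   ("stars_10000_99999", some 10000, some 99999, "10,000 to 99,999 stars"),
   ("stars_100000_999999", some 100000, some 999999, "100,000 to 999,999 stars"),
   ("stars_1000000_plus", some 1000000, none, "1,000,000+ stars")]

-- the for-loop with its early returns; `.getD 0` only fills the (minimum = None, maximum = some _)
-- branch, which never occurs in the literal table (Python would raise TypeError there)
def starLoop (stars : Int) : List (String × Option Int × Option Int × String) → Option String
  | [] => none
  | (key, mn, mx, _) :: rest =>
    if mn = none ∧ mx = none then starLoop stars rest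
    else match mx with
      | none => if stars ≥ mn.getD 0 then some key else starLoop stars rest
      | some M => if mn.getD 0 ≤ stars ∧ stars ≤ M then some key else starLoop stars rest

def star_bucket (repo : List (String × Option Int)) : String :=
  match (PySem.Dict.get? (PySem.Dict.mk repo) "stargazers_count").join with
  | none => "stars_unknown"
  | some stars => (starLoop stars starBuckets).getD "stars_0"  -- fallthrough: STAR_BUCKETS[1][0]

-- ===== PORT B =====
def pvBounds : List Int := [1, 10, 100, 1000, 10000, 100000, 1000000]
def pvKeys : List String :=
  ["stars_0", "stars_1_9", "stars_10_99", "stars_100_999",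
   "stars_1000_9999", "stars_10000_99999", "stars_100000_999999", "stars_1000000_plus"]

-- the hand-written bisect_right while-loop; `.getD 0` is exact because lo ≤ mid < hi ≤ 7 keeps
-- the index in range
def bisectLoop (stars : Int) (lo hi : Nat) : Nat :=
  if _h : lo < hi then
    let mid := (lo + hi) / 2
    if pvBounds.getD mid 0 ≤ stars then bisectLoop stars (mid + 1) hi
    else bisectLoop stars lo mid
  else lo
termination_by hi - lo
decreasing_by all_goals omega

def star_bucket_alt (repo : List (String × Option Int)) : String :=
  match (PySem.Dict.get? (PySem.Dict.mk repo) "stargazers_count").join with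
  | none => "stars_unknown"
  | some stars => pvKeys.getD (bisectLoop stars 0 7) ""  -- final lo ≤ 7 < 8 = keys length

-- ===== PRECONDITION & SPEC =====
def Spec_star_bucket (repo : List (String × Option Int)) (out : String) : Prop := out = star_bucket_alt repo
instance (repo : List (String × Option Int)) (out : String) : Decidable (Spec_star_bucket repo out) := by unfold Spec_star_bucket; infer_instance

-- ===== CLAIM (what is proved, stated in full; the proofs are below) =====
def Claim_equal_star_bucket : Prop := ∀ (repo : List (String × Option Int)), Dom_star_bucket repo → Spec_star_bucket repo (star_bucket repo)

-- ===== LEMMAS AND PROOFS =====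
lemma core_eq (s : Int) :
    (starLoop s starBuckets).getD "stars_0" = pvKeys.getD (bisectLoop s 0 7) "" := by
  by_cases g7 : (1000000:Int) ≤ s
  · simp [starLoop, starBuckets, bisectLoop.eq_def, pvBounds, pvKeys, show ((1:Int) ≤ s) from by omega, show ((10:Int) ≤ s) from by omega, show ((100:Int) ≤ s) from by omega, show ((1000:Int) ≤ s) from by omega, show ((10000:Int) ≤ s) from by omega, show ((100000:Int) ≤ s) from by omega, show ((1000000:Int) ≤ s) from by omega, show ¬((0:Int) ≤ s ∧ s ≤ 0) from by omega, show ¬(s ≤ (0:Int)) from by omega, show ¬((1:Int) ≤ s ∧ s ≤ 9) from by omega, show ¬(s ≤ (9:Int)) from by omega, show ¬((10:Int) ≤ s ∧ s ≤ 99) from by omega, show ¬(s ≤ (99:Int)) from by omega, show ¬((100:Int) ≤ s ∧ s ≤ 999) from by omega, show ¬(s ≤ (999:Int)) from by omega, show ¬((1000:Int) ≤ s ∧ s ≤ 9999) from by omega, show ¬(s ≤ (9999:Int)) from by omega, show ¬((10000:Int) ≤ s ∧ s ≤ 99999) from by omega, show ¬(s ≤ (99999:Int)) from by omega, show ¬((100000:Int)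 ≤ s ∧ s ≤ 999999) from by omega, show ¬(s ≤ (999999:Int)) from by omega, show (s ≥ (1000000:Int)) from by omega]
  by_cases g6 : (100000:Int) ≤ s
  · simp [starLoop, starBuckets, bisectLoop.eq_def, pvBounds, pvKeys, show ((1:Int) ≤ s) from by omega, show ((10:Int) ≤ s) from by omega, show ((100:Int) ≤ s) from by omega, show ((1000:Int) ≤ s) from by omega, show ((10000:Int) ≤ s) from by omega, show ((100000:Int) ≤ s) from by omega, show ¬((1000000:Int) ≤ s) from by omega, show ¬((0:Int) ≤ s ∧ s ≤ 0) from by omega, show ¬(s ≤ (0:Int)) from by omega, show ¬((1:Int) ≤ s ∧ s ≤ 9) from by omega, show ¬(s ≤ (9:Int)) from by omega, show ¬((10:Int) ≤ s ∧ s ≤ 99) from by omega, show ¬(s ≤ (99:Int)) from by omega, show ¬((100:Int) ≤ s ∧ s ≤ 999) from by omega, show ¬(s ≤ (999:Int)) from by omega, show ¬((1000:Int) ≤ s ∧ s ≤ 9999) from by omega, show ¬(s ≤ (9999:Int)) from by omega, show ¬((10000:Int) ≤ s ∧ s ≤ 99999) from by omega, show ¬(s ≤ (99999:Int)) from by omega,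 show ((100000:Int) ≤ s ∧ s ≤ 999999) from by omega, show (s ≤ (999999:Int)) from by omega, show ¬(s ≥ (1000000:Int)) from by omega]
  by_cases g5 : (10000:Int) ≤ s
  · simp [starLoop, starBuckets, bisectLoop.eq_def, pvBounds, pvKeys, show ((1:Int) ≤ s) from by omega, show ((10:Int) ≤ s) from by omega, show ((100:Int) ≤ s) from by omega, show ((1000:Int) ≤ s) from by omega, show ((10000:Int) ≤ s) from by omega, show ¬((100000:Int) ≤ s) from by omega, show ¬((1000000:Int) ≤ s) from by omega, show ¬((0:Int) ≤ s ∧ s ≤ 0) from by omega, show ¬(s ≤ (0:Int)) from by omega, show ¬((1:Int) ≤ s ∧ s ≤ 9) from by omega, show ¬(s ≤ (9:Int)) from by omega, show ¬((10:Int) ≤ s ∧ s ≤ 99) from by omega, show ¬(s ≤ (99:Int)) from by omega, show ¬((100:Int) ≤ s ∧ s ≤ 999) from by omega, show ¬(s ≤ (999:Int)) from by omega, show ¬((1000:Int) ≤ s ∧ s ≤ 9999) from by omega, show ¬(s ≤ (9999:Int)) from by omega, show ((10000:Int) ≤ s ∧ s ≤ 99999) from by omega, show (s ≤ (99999:Int))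 from by omega, show ¬((100000:Int) ≤ s ∧ s ≤ 999999) from by omega, show (s ≤ (999999:Int)) from by omega, show ¬(s ≥ (1000000:Int)) from by omega]
  by_cases g4 : (1000:Int) ≤ s
  · simp [starLoop, starBuckets, bisectLoop.eq_def, pvBounds, pvKeys, show ((1:Int) ≤ s) from by omega, show ((10:Int) ≤ s) from by omega, show ((100:Int) ≤ s) from by omega, show ((1000:Int) ≤ s) from by omega, show ¬((10000:Int) ≤ s) from by omega, show ¬((100000:Int) ≤ s) from by omega, show ¬((1000000:Int) ≤ s) from by omega, show ¬((0:Int) ≤ s ∧ s ≤ 0) from by omega, show ¬(s ≤ (0:Int)) from by omega, show ¬((1:Int) ≤ s ∧ s ≤ 9) from by omega, show ¬(s ≤ (9:Int)) from by omega, show ¬((10:Int) ≤ s ∧ s ≤ 99) from by omega, show ¬(s ≤ (99:Int)) from by omega, show ¬((100:Int) ≤ s ∧ s ≤ 999) from by omega, show ¬(s ≤ (999:Int)) from by omega, show ((1000:Int) ≤ s ∧ s ≤ 9999) from by omega, show (s ≤ (9999:Int)) from by omega, show ¬((10000:Int) ≤ s ∧ s ≤ 99999) from by omega, show (s ≤ (99999:Int))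 from by omega, show ¬((100000:Int) ≤ s ∧ s ≤ 999999) from by omega, show (s ≤ (999999:Int)) from by omega, show ¬(s ≥ (1000000:Int)) from by omega]
  by_cases g3 : (100:Int) ≤ s
  · simp [starLoop, starBuckets, bisectLoop.eq_def, pvBounds, pvKeys, show ((1:Int) ≤ s) from by omega, show ((10:Int) ≤ s) from by omega, show ((100:Int) ≤ s) from by omega, show ¬((1000:Int) ≤ s) from by omega, show ¬((10000:Int) ≤ s) from by omega, show ¬((100000:Int) ≤ s) from by omega, show ¬((1000000:Int) ≤ s) from by omega, show ¬((0:Int) ≤ s ∧ s ≤ 0) from by omega, show ¬(s ≤ (0:Int)) from by omega, show ¬((1:Int) ≤ s ∧ s ≤ 9) from by omega, show ¬(s ≤ (9:Int)) from by omega, show ¬((10:Int) ≤ s ∧ s ≤ 99) from by omega, show ¬(s ≤ (99:Int)) from by omega, show ((100:Int) ≤ s ∧ s ≤ 999) from by omega, show (s ≤ (999:Int)) from by omega, show ¬((1000:Int) ≤ s ∧ s ≤ 9999) from by omega, show (s ≤ (9999:Int)) from by omega, show ¬((10000:Int) ≤ s ∧ s ≤ 99999) from by omega, show (s ≤ (99999:Int))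 from by omega, show ¬((100000:Int) ≤ s ∧ s ≤ 999999) from by omega, show (s ≤ (999999:Int)) from by omega, show ¬(s ≥ (1000000:Int)) from by omega]
  by_cases g2 : (10:Int) ≤ s
  · simp [starLoop, starBuckets, bisectLoop.eq_def, pvBounds, pvKeys, show ((1:Int) ≤ s) from by omega, show ((10:Int) ≤ s) from by omega, show ¬((100:Int) ≤ s) from by omega, show ¬((1000:Int) ≤ s) from by omega, show ¬((10000:Int) ≤ s) from by omega, show ¬((100000:Int) ≤ s) from by omega, show ¬((1000000:Int) ≤ s) from by omega, show ¬((0:Int) ≤ s ∧ s ≤ 0) from by omega, show ¬(s ≤ (0:Int)) from by omega, show ¬((1:Int) ≤ s ∧ s ≤ 9) from by omega, show ¬(s ≤ (9:Int)) from by omega, show ((10:Int) ≤ s ∧ s ≤ 99) from by omega, show (s ≤ (99:Int)) from by omega, show ¬((100:Int) ≤ s ∧ s ≤ 999) from by omega, show (s ≤ (999:Int)) from by omega, show ¬((1000:Int) ≤ s ∧ s ≤ 9999) from by omega, show (s ≤ (9999:Int)) from by omega, show ¬((10000:Int) ≤ s ∧ s ≤ 99999) from by omega, show (s ≤ (99999:Int))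 from by omega, show ¬((100000:Int) ≤ s ∧ s ≤ 999999) from by omega, show (s ≤ (999999:Int)) from by omega, show ¬(s ≥ (1000000:Int)) from by omega]
  by_cases g1 : (1:Int) ≤ s
  · simp [starLoop, starBuckets, bisectLoop.eq_def, pvBounds, pvKeys, show ((1:Int) ≤ s) from by omega, show ¬((10:Int) ≤ s) from by omega, show ¬((100:Int) ≤ s) from by omega, show ¬((1000:Int) ≤ s) from by omega, show ¬((10000:Int) ≤ s) from by omega, show ¬((100000:Int) ≤ s) from by omega, show ¬((1000000:Int) ≤ s) from by omega, show ¬((0:Int) ≤ s ∧ s ≤ 0) from by omega, show ¬(s ≤ (0:Int)) from by omega, show ((1:Int) ≤ s ∧ s ≤ 9) from by omega, show (s ≤ (9:Int)) from by omega, show ¬((10:Int) ≤ s ∧ s ≤ 99) from by omega, show (s ≤ (99:Int)) from by omega, show ¬((100:Int) ≤ s ∧ s ≤ 999) from by omega, show (s ≤ (999:Int)) from by omega, show ¬((1000:Int) ≤ s ∧ s ≤ 9999) from by omega, show (s ≤ (9999:Int)) from by omega, show ¬((10000:Int) ≤ s ∧ s ≤ 99999) from by omega, show (s ≤ (99999:Int))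 from by omega, show ¬((100000:Int) ≤ s ∧ s ≤ 999999) from by omega, show (s ≤ (999999:Int)) from by omega, show ¬(s ≥ (1000000:Int)) from by omega]
  by_cases g0 : (0:Int) ≤ s
  · simp [starLoop, starBuckets, bisectLoop.eq_def, pvBounds, pvKeys, show ¬((1:Int) ≤ s) from by omega, show ¬((10:Int) ≤ s) from by omega, show ¬((100:Int) ≤ s) from by omega, show ¬((1000:Int) ≤ s) from by omega, show ¬((10000:Int) ≤ s) from by omega, show ¬((100000:Int) ≤ s) from by omega, show ¬((1000000:Int) ≤ s) from by omega, show ((0:Int) ≤ s ∧ s ≤ 0) from by omega, show (s ≤ (0:Int)) from by omega, show ¬((1:Int) ≤ s ∧ s ≤ 9) from by omega, show (s ≤ (9:Int)) from by omega, show ¬((10:Int) ≤ s ∧ s ≤ 99) from by omega, show (s ≤ (99:Int)) from by omega, show ¬((100:Int) ≤ s ∧ s ≤ 999) from by omega, show (s ≤ (999:Int)) from by omega, show ¬((1000:Int) ≤ s ∧ s ≤ 9999) from by omega, show (s ≤ (9999:Int)) from by omega, show ¬((10000:Int) ≤ s ∧ s ≤ 99999) from by omega, show (s ≤ (99999:Int))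 from by omega, show ¬((100000:Int) ≤ s ∧ s ≤ 999999) from by omega, show (s ≤ (999999:Int)) from by omega, show ¬(s ≥ (1000000:Int)) from by omega]
  · simp [starLoop, starBuckets, bisectLoop.eq_def, pvBounds, pvKeys, show ¬((1:Int) ≤ s) from by omega, show ¬((10:Int) ≤ s) from by omega, show ¬((100:Int) ≤ s) from by omega, show ¬((1000:Int) ≤ s) from by omega, show ¬((10000:Int) ≤ s) from by omega, show ¬((100000:Int) ≤ s) from by omega, show ¬((1000000:Int) ≤ s) from by omega, show ¬((0:Int) ≤ s ∧ s ≤ 0) from by omega, show (s ≤ (0:Int)) from by omega, show ¬((1:Int) ≤ s ∧ s ≤ 9) from by omega, show (s ≤ (9:Int)) from by omega, show ¬((10:Int) ≤ s ∧ s ≤ 99) from by omega, show (s ≤ (99:Int)) from by omega, show ¬((100:Int) ≤ s ∧ s ≤ 999) from by omega, show (s ≤ (999:Int)) from by omega, show ¬((1000:Int) ≤ s ∧ s ≤ 9999) from by omega, show (s ≤ (9999:Int)) from by omega, show ¬((10000:Int) ≤ s ∧ s ≤ 99999) from by omega, show (s ≤ (99999:Int)) from by omega, show ¬((100000:Int)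 ≤ s ∧ s ≤ 999999) from by omega, show (s ≤ (999999:Int)) from by omega, show ¬(s ≥ (1000000:Int)) from by omega, g0]

-- ===== VERDICT (by name: the statement is the Claim_ definition above) =====
theorem star_bucket_spec : Claim_equal_star_bucket := by
  intro repo _
  unfold Spec_star_bucket star_bucket star_bucket_alt
  cases (PySem.Dict.get? (PySem.Dict.mk repo) "stargazers_count").join with
  | none => rfl
  | some s => exact core_eq s
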